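-- pv_equiv track=rewrite | github.com/rajaramr7/apisec-agent | apisec/pr/github.py | _parse_remote_output
-- ===== SOURCE A (Python) =====
-- from typing import Any, Dict, List, Optional, Tuple
--
-- def _parse_remote_output(output: str) -> Optional[str]:
--     """Parse git remote -v output to extract origin URL.
--
--     Args:
--         output: Output from git remote -v
--
--     Returns:
--         Remote URL or None
--     """
--     for line in output.strip().split("\n"):
--         if line.startswith("origin") and "(fetch)" in line:
--             # origin\thttps://github.com/owner/repo.git (fetch)
--             parts = line.split()
--             if len(parts) >= 2:
--                 return parts[1]
--
--     # If no origin found, try the first remote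
--     for line in output.strip().split("\n"):
--         if "(fetch)" in line:
--             parts = line.split()
--             if len(parts) >= 2:
--                 return parts[1]
--
--     return None
-- ===== SOURCE B (Python) =====
-- from typing import Optional
--
-- def _parse_remote_output(output: str) -> Optional[str]:
--     """Parse git remote -v output to extract origin URL (single pass with fallback)."""
--     fallback = None
--     for line in output.strip().split("\n"):
--         if "(fetch)" in line:
--             parts = line.split()
--             if len(parts) >= 2:
--                 if line.startswith("origin"):
--                     return parts[1]
--                 if fallback is None:
--                     fallback = parts[1]
--     return fallback
-- ===== Notes on version B (the rewrite author's own statement) =====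
-- stated objective: simpler
-- what changed: Replaces A's two separate scans of the line list (origin pass, then generic fetch pass) by one pass that returns an origin match immediately and keeps the first generic fetch URL in a fallback accumulator.
import Mathlib
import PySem

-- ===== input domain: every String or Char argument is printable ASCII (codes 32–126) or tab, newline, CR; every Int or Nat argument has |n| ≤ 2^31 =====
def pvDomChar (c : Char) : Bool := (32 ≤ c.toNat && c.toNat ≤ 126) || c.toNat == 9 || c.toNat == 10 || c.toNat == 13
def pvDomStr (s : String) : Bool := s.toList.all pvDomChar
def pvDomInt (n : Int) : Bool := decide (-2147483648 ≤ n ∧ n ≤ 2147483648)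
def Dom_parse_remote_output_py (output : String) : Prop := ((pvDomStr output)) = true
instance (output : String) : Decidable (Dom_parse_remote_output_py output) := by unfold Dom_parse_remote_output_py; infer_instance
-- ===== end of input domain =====

-- B is a single pass with a fallback accumulator instead of A's two scans; same return value everywhere.

-- ===== PORT A =====
-- first loop of A: return parts[1] of the first line starting with "origin" that contains "(fetch)" and has ≥ 2 fields
def pvScanOrigin : List String → Option String
  | [] => none
  | l :: rest =>
    if PySem.Str.startswith l "origin" && PySem.Str.isIn "(fetch)" l then
      match PySem.Str.split₀ l with
      | _ :: p :: _ => some p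
      | _ => pvScanOrigin rest
    else pvScanOrigin rest

-- second loop of A: first line containing "(fetch)" with ≥ 2 fields
def pvScanAny : List String → Option String
  | [] => none
  | l :: rest =>
    if PySem.Str.isIn "(fetch)" l then
      match PySem.Str.split₀ l with
      | _ :: p :: _ => some p
      | _ => pvScanAny rest
    else pvScanAny rest

def parse_remote_output_py (output : String) : Option String :=
  let lines := ((PySem.Str.split? (PySem.Str.strip output) "\n").getD [])
  match pvScanOrigin lines with
  | some u => some u
  | none => pvScanAny lines

-- ===== PORT B =====
-- B's single loop: origin match returns immediately; first generic fetch URL is kept in fb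
def pvAltLoop : List String → Option String → Option String
  | [], fb => fb
  | l :: rest, fb =>
    if PySem.Str.isIn "(fetch)" l then
      match PySem.Str.split₀ l with
      | _ :: p :: _ =>
        if PySem.Str.startswith l "origin" then some p
        else pvAltLoop rest (if fb.isNone then some p else fb)
      | _ => pvAltLoop rest fb
    else pvAltLoop rest fb

def parse_remote_output_py_alt (output : String) : Option String :=
  pvAltLoop (((PySem.Str.split? (PySem.Str.strip output) "\n").getD [])) none

-- ===== PRECONDITION & SPEC =====
def Spec_parse_remote_output_py (output : String) (out : Option String) : Prop := out = parse_remote_output_py_alt output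
instance (output : String) (out : Option String) : Decidable (Spec_parse_remote_output_py output out) := by unfold Spec_parse_remote_output_py; infer_instance

-- ===== CLAIM (what is proved, stated in full; the proofs are below) =====
def Claim_equal_parse_remote_output_py : Prop := ∀ (output : String), Dom_parse_remote_output_py output → Spec_parse_remote_output_py output (parse_remote_output_py output)

-- ===== LEMMAS AND PROOFS =====

-- loop invariant: B's single pass equals "origin scan, else fallback, else generic scan"
theorem pvAltLoop_eq (lines : List String) (fb : Option String) :
    pvAltLoop lines fb =
      match pvScanOrigin lines with
      | some u => some u
      | none => match fb with
        | some v => some v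
        | none => pvScanAny lines := by
  induction lines generalizing fb with
  | nil => cases fb <;> simp [pvAltLoop, pvScanOrigin, pvScanAny]
  | cons l rest ih =>
    by_cases hf : PySem.Chars.isIn ['(', 'f', 'e', 't', 'c', 'h', ')'] l.toList = true
    · by_cases ho : PySem.Chars.startswith l.toList ['o', 'r', 'i', 'g', 'i', 'n'] = true <;>
        cases hs : PySem.Str.split₀ l with
      | nil => simp [pvAltLoop, pvScanOrigin, pvScanAny, hf, ho, hs, ih]
      | cons a t =>
        cases t with
        | nil => simp [pvAltLoop, pvScanOrigin, pvScanAny, hf, ho, hs, ih]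
        | cons p t' =>
          cases fb <;> simp [pvAltLoop, pvScanOrigin, pvScanAny, hf, ho, hs, ih]
    · simp [pvAltLoop, pvScanOrigin, pvScanAny, hf, ih]

-- ===== VERDICT (by name: the statement is the Claim_ definition above) =====
theorem parse_remote_output_py_spec : Claim_equal_parse_remote_output_py := by
  intro output _
  unfold Spec_parse_remote_output_py parse_remote_output_py parse_remote_output_py_alt
  rw [pvAltLoop_eq]
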